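-- pv_equiv track=rewrite | github.com/rlorigro/nanopore_assembly | test_poapy.py | get_alignment_by_label
-- ===== SOURCE A (Python) =====
-- def get_alignment_by_label(alignments, label):
--     """
--     iterate through poapy alignment tuples to find an alignment with the specified label
--     :param alignments:
--     :return:
--     """
--     query_alignment = None
--
--     for alignment in alignments:
--         if alignment[0] == label:
--             query_alignment = alignment
--
--     if query_alignment is None:
--         exit("ERROR: query label not found in alignments")
--
--     return query_alignment
-- ===== SOURCE B (Python) =====
-- def get_alignment_by_label(alignments, label):
--     """
--     iterate through poapy alignment tuples to find an alignment with the specified label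
--     :param alignments:
--     :return:
--     """
--     items = list(alignments)
--     for alignment in reversed(items):
--         if alignment[0] == label:
--             return alignment
--     exit("ERROR: query label not found in alignments")
-- ===== Notes on version B (the rewrite author's own statement) =====
-- stated objective: alternative
-- what changed: Replaces A's full forward scan that keeps overwriting a running last-match variable with a backward scan over the reversed list that returns at the first (i.e. last) match, so no accumulator is maintained and the scan stops early.
import Mathlib
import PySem

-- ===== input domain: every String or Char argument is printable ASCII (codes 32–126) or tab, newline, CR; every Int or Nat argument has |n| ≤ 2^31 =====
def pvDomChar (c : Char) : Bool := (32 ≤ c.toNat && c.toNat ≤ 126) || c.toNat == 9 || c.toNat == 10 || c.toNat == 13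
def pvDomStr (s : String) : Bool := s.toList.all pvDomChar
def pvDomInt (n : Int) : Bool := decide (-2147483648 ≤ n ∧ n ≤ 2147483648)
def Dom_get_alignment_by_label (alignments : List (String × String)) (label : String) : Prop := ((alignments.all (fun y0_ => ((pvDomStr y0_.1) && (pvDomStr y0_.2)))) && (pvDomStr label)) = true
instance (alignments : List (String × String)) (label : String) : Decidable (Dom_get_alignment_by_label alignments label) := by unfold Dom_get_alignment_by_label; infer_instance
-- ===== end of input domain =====

-- B replaces A's forward scan with a running last-match accumulator by a backward scan
-- returning at the first match (objective: alternative decomposition; same O(n) cost).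

-- ===== PORT A =====
-- forward scan, query_alignment overwritten on every match; the `none` branch is
-- Python's exit(...) (SystemExit), excluded by Pre_, so the port returns a dummy there.
def get_alignment_by_label (alignments : List (String × String)) (label : String) : String × String :=
  let q := alignments.foldl (fun acc a => if a.1 == label then some a else acc)
             (none : Option (String × String))
  match q with
  | some a => a
  | none => ("", "")  -- exit("ERROR: query label not found in alignments"): unreachable under Pre_

-- ===== PORT B =====
-- backward scan over the reversed list, early return at the first match.
def pvBackScan (l : List (String × String)) (label : String) : String × String :=
  match l with
  | [] => ("", "")  -- exit("ERROR: query label not found in alignments"): unreachable under Pre_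
  | a :: rest => if a.1 == label then a else pvBackScan rest label

def get_alignment_by_label_alt (alignments : List (String × String)) (label : String) : String × String :=
  pvBackScan alignments.reverse label

-- ===== PRECONDITION & SPEC =====
-- Pre_ excludes exactly the inputs with no tuple labelled `label`, on which Python A
-- calls exit(...) (SystemExit) and returns no value.
def Pre_get_alignment_by_label (alignments : List (String × String)) (label : String) : Prop :=
  ∃ p ∈ alignments, p.1 = label
instance (alignments : List (String × String)) (label : String) : Decidable (Pre_get_alignment_by_label alignments label) := by unfold Pre_get_alignment_by_label; infer_instance

def pvWitness_get_alignment_by_label : (List (String × String)) × String := ([("a", "GAT"), ("b", "TAC")], "b")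

def Spec_get_alignment_by_label (alignments : List (String × String)) (label : String) (out : String × String) : Prop := out = get_alignment_by_label_alt alignments label
instance (alignments : List (String × String)) (label : String) (out : String × String) : Decidable (Spec_get_alignment_by_label alignments label out) := by unfold Spec_get_alignment_by_label; infer_instance

-- ===== CLAIM (what is proved, stated in full; the proofs are below) =====
def Claim_equal_get_alignment_by_label : Prop := ∀ (alignments : List (String × String)) (label : String), Dom_get_alignment_by_label alignments label → Pre_get_alignment_by_label alignments label → Spec_get_alignment_by_label alignments label (get_alignment_by_label alignments label)

-- ===== LEMMAS AND PROOFS =====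

-- A's foldl over l starting from acc is the last match in l, else acc.
theorem foldl_lastMatch (label : String) (l : List (String × String))
    (acc : Option (String × String)) :
    l.foldl (fun acc a => if a.1 == label then some a else acc) acc
      = match l.reverse.find? (fun a => a.1 == label) with
        | some a => some a
        | none => acc := by
  induction l generalizing acc with
  | nil => simp
  | cons x xs ih =>
    simp only [List.foldl_cons, ih, List.reverse_cons, List.find?_append]
    cases h : xs.reverse.find? (fun a => a.1 == label) with
    | some a => simp
    | none =>
      by_cases hx : x.1 == label <;> simp [List.find?, hx]

-- B's backward scan is the first match in l, else the dummy.
theorem pvBackScan_find (label : String) (l : List (String × String)) :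
    pvBackScan l label
      = match l.find? (fun a => a.1 == label) with
        | some a => a
        | none => ("", "") := by
  induction l with
  | nil => simp [pvBackScan]
  | cons x xs ih =>
    by_cases h : x.1 == label <;> simp [pvBackScan, List.find?, h, ih]

-- ===== VERDICT (by name: the statement is the Claim_ definition above) =====
theorem get_alignment_by_label_spec : Claim_equal_get_alignment_by_label := by
  intro alignments label _ hpre
  unfold Spec_get_alignment_by_label get_alignment_by_label get_alignment_by_label_alt
  rw [foldl_lastMatch, pvBackScan_find]
  cases h : alignments.reverse.find? (fun a => a.1 == label) with
  | some a => simp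
  | none =>
    exfalso
    obtain ⟨p, hp, hl⟩ := hpre
    have := List.find?_eq_none.mp h p (by simpa using hp)
    simp [hl] at this
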